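-- pv_equiv track=rewrite | github.com/posl/comment_recommendation | script/mod_gen/1_time/zh/258_A/9.py | time_calculator
-- ===== SOURCE A (Python) =====
-- def time_calculator(k):
--     if k == 0:
--         return "21:00"
--     else:
--         hour = 21
--         minute = 0
--         for i in range(k):
--             minute += 1
--             if minute == 60:
--                 hour += 1
--                 minute = 0
--             if hour == 24:
--                 hour = 0
--         if hour < 10:
--             hour = "0" + str(hour)
--         else:
--             hour = str(hour)
--         if minute < 10:
--             minute = "0" + str(minute)
--         else:
--             minute = str(minute)
--         return hour + ":" + minute
-- ===== SOURCE B (Python) =====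
-- def time_calculator(k):
--     total = (21 * 60 + k) % 1440
--     h, m = divmod(total, 60)
--     return _pad2(h) + ":" + _pad2(m)
--
--
-- def _pad2(x):
--     return ("0" if x < 10 else "") + str(x)
-- ===== Notes on version B (the rewrite author's own statement) =====
-- stated objective: faster
-- what changed: Replaces the minute-by-minute simulation loop of k iterations with O(1) modular arithmetic: (21*60+k) mod 1440, then divmod by 60 and zero-pad.
-- intended difference: For negative k not a multiple of 1440, A's range(k) loop is empty so A returns the stale start time "21:00", while B returns the correctly shifted clock time (e.g. "20:55" for k=-5), which is the intended value for 'add k minutes to 21:00'. — e.g. on time_calculator(-5): A returns "21:00", B returns "20:55"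
import Mathlib
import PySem

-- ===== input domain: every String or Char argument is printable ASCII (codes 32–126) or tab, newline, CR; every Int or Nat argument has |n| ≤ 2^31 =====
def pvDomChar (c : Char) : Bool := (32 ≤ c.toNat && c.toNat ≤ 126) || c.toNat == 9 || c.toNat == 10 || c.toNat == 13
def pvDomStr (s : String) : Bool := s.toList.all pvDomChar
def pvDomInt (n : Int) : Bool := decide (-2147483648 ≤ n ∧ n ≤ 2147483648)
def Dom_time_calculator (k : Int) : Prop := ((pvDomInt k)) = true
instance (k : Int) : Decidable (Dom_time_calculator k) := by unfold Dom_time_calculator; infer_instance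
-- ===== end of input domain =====

-- B replaces A's minute-by-minute simulation loop with O(1) modular arithmetic
-- ((21*60+k) mod 1440, divmod 60, zero-pad); for negative k not divisible by 1440
-- A's empty loop leaves the start time unchanged while B shifts the clock (see D_).

-- ===== PORT A =====
-- A's loop body: minute += 1; if minute == 60: hour += 1; minute = 0; if hour == 24: hour = 0
def aStep (p : Int × Int) (_ : Int) : Int × Int :=
  let minute := p.2 + 1
  let q : Int × Int := if minute == 60 then (p.1 + 1, 0) else (p.1, minute)
  let hour : Int := if q.1 == 24 then 0 else q.1
  (hour, q.2)

-- Python string "+" is ported on List Char (exact), final String.ofList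
def time_calculator (k : Int) : String :=
  if k == 0 then "21:00"
  else
    let st := (PySem.List.pyRange 0 k 1).foldl aStep (21, 0)
    let hourS := if st.1 < 10 then '0' :: PySem.Int.toChars st.1 else PySem.Int.toChars st.1
    let minuteS := if st.2 < 10 then '0' :: PySem.Int.toChars st.2 else PySem.Int.toChars st.2
    String.ofList (hourS ++ ':' :: minuteS)

-- ===== PORT B =====
-- helper _pad2 of Source B ("+" on str ported on List Char, exact)
def pad2 (x : Int) : List Char := (if x < 10 then ['0'] else []) ++ PySem.Int.toChars x

def time_calculator_alt (k : Int) : String :=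
  let total := PySem.Int.mod (21 * 60 + k) 1440
  let h := PySem.Int.floordiv total 60
  let m := PySem.Int.mod total 60
  String.ofList (pad2 h ++ ':' :: pad2 m)

-- ===== PRECONDITION & SPEC =====
-- For negative k not a multiple of 1440, A's range(k) loop is empty so A returns the stale
-- start time "21:00", while B returns the correctly shifted clock time (e.g. "20:55" for
-- k = -5), which is the intended value for 'add k minutes to 21:00'.
def D_time_calculator (k : Int) : Prop := k < 0 ∧ ¬ (1440 ∣ k)
instance (k : Int) : Decidable (D_time_calculator k) := by unfold D_time_calculator; infer_instance

def Spec_time_calculator (k : Int) (out : String) : Prop := ¬ D_time_calculator k → out = time_calculator_alt k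
instance (k : Int) (out : String) : Decidable (Spec_time_calculator k out) := by unfold Spec_time_calculator; infer_instance

def pvDiffWitness_time_calculator : Int := (-5)
def pvDiffWitnessOut_time_calculator : String × String := ("21:00", "20:55")

-- ===== CLAIM (what is proved, stated in full; the proofs are below) =====
def Claim_unchanged_time_calculator : Prop := ∀ (k : Int), Dom_time_calculator k → Spec_time_calculator k (time_calculator k)
def Claim_changed_time_calculator : Prop := Dom_time_calculator (pvDiffWitness_time_calculator) ∧ D_time_calculator (pvDiffWitness_time_calculator) ∧ time_calculator (pvDiffWitness_time_calculator) = pvDiffWitnessOut_time_calculator.1 ∧ time_calculator_alt (pvDiffWitness_time_calculator) = pvDiffWitnessOut_time_calculator.2 ∧ pvDiffWitnessOut_time_calculator.1 ≠ pvDiffWitnessOut_time_calculator.2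
def Claim_exact_time_calculator : Prop := ∀ (k : Int), Dom_time_calculator k → D_time_calculator k → time_calculator k ≠ time_calculator_alt k

-- ===== LEMMAS AND PROOFS =====

lemma aStep_eq (T : Int) (h0 : 0 ≤ T) (h1 : T < 1440) (x : Int) :
    aStep (T / 60, T % 60) x = ((T + 1) % 1440 / 60, (T + 1) % 1440 % 60) := by
  simp only [aStep, beq_iff_eq]
  split_ifs with hm hh hh <;> simp_all <;> constructor <;> omega

-- loop invariant: after n iterations the state is the clock at 1260 + n minutes
lemma loop_inv (n : Nat) :
    List.foldl aStep (21, 0) (List.map (fun j : Nat => (0:Int) + (j:Int)) (List.range n))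
      = ((1260 + (n:Int)) % 1440 / 60, (1260 + (n:Int)) % 1440 % 60) := by
  induction n with
  | zero => decide
  | succ n ih =>
    rw [List.range_succ, List.map_append, List.foldl_append, ih, List.map_singleton,
      List.foldl_cons, List.foldl_nil,
      aStep_eq _ (Int.emod_nonneg _ (by omega)) (Int.emod_lt_of_pos _ (by omega))]
    simp only [Prod.mk.injEq]; push_cast; constructor <;> omega

lemma foldl_pyRange_aStep (k : Int) (hk : 0 < k) :
    (PySem.List.pyRange 0 k 1).foldl aStep (21, 0)
      = ((1260 + k) % 1440 / 60, (1260 + k) % 1440 % 60) := by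
  rw [PySem.List.pyRange_one, show k - 0 = k by ring, loop_inv,
    Int.toNat_of_nonneg (by omega)]

lemma alt_eq (k : Int) :
    time_calculator_alt k
      = String.ofList (pad2 ((1260 + k) % 1440 / 60) ++ ':' :: pad2 ((1260 + k) % 1440 % 60)) := by
  have h14 : (0:Int) < 1440 := by omega
  have h60 : (0:Int) < 60 := by omega
  simp only [time_calculator_alt, PySem.Int.mod_eq_emod_of_pos h14,
    PySem.Int.mod_eq_emod_of_pos h60, PySem.Int.floordiv_eq_ediv_of_pos h60]
  norm_num

-- B's string at any clock offset t ≠ 1260 inside a day is never "21:00"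
set_option maxRecDepth 100000 in
set_option maxHeartbeats 1000000 in
lemma pad_ne (t : Fin 1440) (ht : t.val ≠ 1260) :
    String.ofList (pad2 ((t.val : Int) / 60) ++ ':' :: pad2 ((t.val : Int) % 60)) ≠ "21:00" := by
  revert ht; revert t; decide

lemma dvd_of_mod_eq (k : Int) (h : (1260 + k) % 1440 = 1260) : (1440:Int) ∣ k := by
  have h2 := Int.emod_add_mul_ediv (1260 + k) 1440
  exact ⟨(1260 + k) / 1440, by omega⟩

lemma a_eq_2100_of_neg (k : Int) (hneg : k < 0) : time_calculator k = "21:00" := by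
  simp only [time_calculator, beq_iff_eq, if_neg (by omega : ¬ k = 0)]
  rw [PySem.List.pyRange_one, show k - 0 = k by ring, Int.toNat_of_nonpos (by omega)]
  decide

theorem time_calculator_spec : Claim_unchanged_time_calculator := by
  intro k _ hD
  rw [alt_eq]
  by_cases h0 : k = 0
  · subst h0; decide
  · by_cases hpos : 0 < k
    · simp only [time_calculator, beq_iff_eq, if_neg h0, foldl_pyRange_aStep k hpos]
      set T := (1260 + k) % 1440 with hT
      have hT0 : 0 ≤ T := Int.emod_nonneg _ (by omega)
      have hT1 : T < 1440 := Int.emod_lt_of_pos _ (by omega)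
      simp only [pad2]
      split_ifs with h1 h2 h2 <;> simp
    · -- k < 0 and 1440 ∣ k : the loop is empty and (1260+k) % 1440 = 1260
      have hneg : k < 0 := by omega
      have hdvd : (1440:Int) ∣ k := by
        by_contra h; exact hD ⟨hneg, h⟩
      have hmod : (1260 + k) % 1440 = 1260 := by
        obtain ⟨c, rfl⟩ := hdvd; omega
      rw [hmod, a_eq_2100_of_neg k hneg]
      decide

theorem time_calculator_changed : Claim_changed_time_calculator := by
  unfold Claim_changed_time_calculator; decide

theorem time_calculator_tight : Claim_exact_time_calculator := by
  intro k _ hD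
  obtain ⟨hneg, hdvd⟩ := hD
  rw [a_eq_2100_of_neg k hneg, alt_eq]
  have hT0 : 0 ≤ (1260 + k) % 1440 := Int.emod_nonneg _ (by omega)
  have hT1 : (1260 + k) % 1440 < 1440 := Int.emod_lt_of_pos _ (by omega)
  have hTne : (1260 + k) % 1440 ≠ 1260 := fun h => hdvd (dvd_of_mod_eq k h)
  have hne' : ((1260 + k) % 1440).toNat ≠ 1260 := by omega
  have hp := pad_ne ⟨((1260 + k) % 1440).toNat, by omega⟩ hne'
  rw [Fin.val_mk, Int.toNat_of_nonneg hT0] at hp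
  exact fun h => hp h.symm
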